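-- pv_equiv track=rewrite | github.com/Ko-udon/Algorithm | 프로그래머스/2/87377. 교점에 별 만들기/교점에 별 만들기.py | display_coordinates
-- ===== SOURCE A (Python) =====
-- def display_coordinates(coordinates):
--     # 좌표 중 최대값과 최소값을 찾아 배열의 크기를 결정
--     min_x = min(x for x, _ in coordinates)
--     max_x = max(x for x, _ in coordinates)
--     min_y = min(y for _, y in coordinates)
--     max_y = max(y for _, y in coordinates)
--     size_x = max_x - min_x + 1
--     size_y = max_y - min_y + 1
--
--     grid = [['.' for _ in range(size_x)] for _ in range(size_y)]
--
--     for x, y in coordinates: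
--         grid[max_y - y][x - min_x] = '*'
--
--     result = [''.join(row) for row in grid]
--     return result
-- ===== SOURCE B (Python) =====
-- def display_coordinates(coordinates):
--     min_x = min(x for x, _ in coordinates)
--     max_x = max(x for x, _ in coordinates)
--     min_y = min(y for _, y in coordinates)
--     max_y = max(y for _, y in coordinates)
--     width = max_x - min_x + 1
--     rows = {}
--     for x, y in coordinates:
--         rows.setdefault(y, set()).add(x)
--     result = []
--     for y in range(max_y, min_y - 1, -1):
--         xs = rows.get(y)
--         if xs is None:
--             result.append('.' * width)
--         else:
--             result.append(''.join('*' if x in xs else '.'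
--                                   for x in range(min_x, max_x + 1)))
--     return result
-- ===== Notes on version B (the rewrite author's own statement) =====
-- stated objective: alternative
-- what changed: Replaces A's scatter-into-a-mutable-2D-grid (allocate a dot grid, write '*' at computed indices, join rows) by a gather: points are grouped once into a dict y -> set of x, then each output row is emitted directly - rows without points as '.'*width in one step, rows with points by a membership test per cell - so no mutable grid is ever materialized.
import Mathlib
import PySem

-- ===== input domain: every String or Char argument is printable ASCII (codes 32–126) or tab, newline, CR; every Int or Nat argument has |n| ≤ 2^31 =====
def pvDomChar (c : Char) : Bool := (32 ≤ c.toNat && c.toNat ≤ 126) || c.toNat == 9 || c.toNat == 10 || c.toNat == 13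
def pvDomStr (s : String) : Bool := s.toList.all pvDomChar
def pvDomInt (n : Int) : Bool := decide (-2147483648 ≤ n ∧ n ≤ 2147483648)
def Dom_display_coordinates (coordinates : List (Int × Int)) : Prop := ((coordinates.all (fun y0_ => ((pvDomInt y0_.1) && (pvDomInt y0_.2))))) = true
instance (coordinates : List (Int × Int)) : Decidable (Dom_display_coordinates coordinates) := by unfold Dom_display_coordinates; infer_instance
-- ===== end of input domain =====

-- B replaces A's scatter-into-a-mutable-grid by a set of points and one membership
-- test per emitted cell (objective: simpler). Equivalence is about the return value.

-- ===== PORT A =====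
-- A: build an all-'.' grid, write '*' at (max_y - y, x - min_x) for each point, join rows.
def display_coordinates (coordinates : List (Int × Int)) : List String :=
  match PySem.List.min? (coordinates.map (fun p => p.1)) (fun v => v),
        PySem.List.max? (coordinates.map (fun p => p.1)) (fun v => v),
        PySem.List.min? (coordinates.map (fun p => p.2)) (fun v => v),
        PySem.List.max? (coordinates.map (fun p => p.2)) (fun v => v) with
  | some min_x, some max_x, some min_y, some max_y =>
      let size_x := max_x - min_x + 1
      let size_y := max_y - min_y + 1
      let grid : List (List Char) :=
        (PySem.List.pyRange 0 size_y 1).map (fun _ =>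
          (PySem.List.pyRange 0 size_x 1).map (fun _ => '.'))
      let grid := coordinates.foldl (fun g p =>
        -- grid[max_y - y][x - min_x] = '*' ; both indices are in range here
        PySem.List.pySetD g (max_y - p.2)
          (PySem.List.pySetD (PySem.List.pyGetD g (max_y - p.2) []) (p.1 - min_x) '*')) grid
      grid.map (fun row => String.ofList row)
  | _, _, _, _ => []

-- ===== PORT B =====
-- B: group the points by row (y -> set of x); rows y = max_y..min_y: a row with no
-- points is emitted as all dots at once, otherwise cells x = min_x..max_x by membership test.
def display_coordinates_alt (coordinates : List (Int × Int)) : List String :=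
  match PySem.List.min? (coordinates.map (fun p => p.1)) (fun v => v) with
  | none => []
  | some min_x =>
    match PySem.List.max? (coordinates.map (fun p => p.1)) (fun v => v) with
    | none => []
    | some max_x =>
      match PySem.List.min? (coordinates.map (fun p => p.2)) (fun v => v) with
      | none => []
      | some min_y =>
        match PySem.List.max? (coordinates.map (fun p => p.2)) (fun v => v) with
        | none => []
        | some max_y =>
          let width := max_x - min_x + 1
          let rows : PySem.Dict Int (PySem.Set Int) :=
            coordinates.foldl (fun d p =>
              d.insert p.2 (PySem.Set.add (d.getD p.2 []) p.1)) PySem.Dict.empty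
          (PySem.List.pyRange max_y (min_y - 1) (-1)).map (fun y =>
            match PySem.Dict.get? rows y with
            | none => String.ofList (List.replicate width.toNat '.')  -- '.' * width
            | some xs =>
              String.ofList ((PySem.List.pyRange min_x (max_x + 1) 1).map (fun x =>
                if PySem.Set.contains xs x then '*' else '.')))

-- ===== PRECONDITION & SPEC =====
-- Pre_ excludes only the empty list, on which Python's min() raises ValueError.
def Pre_display_coordinates (coordinates : List (Int × Int)) : Prop := coordinates ≠ []
instance (coordinates : List (Int × Int)) : Decidable (Pre_display_coordinates coordinates) := by unfold Pre_display_coordinates; infer_instance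
def pvWitness_display_coordinates : (List (Int × Int)) := [(0, 0), (2, 1)]

def Spec_display_coordinates (coordinates : List (Int × Int)) (out : List String) : Prop := out = display_coordinates_alt coordinates
instance (coordinates : List (Int × Int)) (out : List String) : Decidable (Spec_display_coordinates coordinates out) := by unfold Spec_display_coordinates; infer_instance

-- ===== CLAIM (what is proved, stated in full; the proofs are below) =====
def Claim_equal_display_coordinates : Prop := ∀ (coordinates : List (Int × Int)), Dom_display_coordinates coordinates → Pre_display_coordinates coordinates → Spec_display_coordinates coordinates (display_coordinates coordinates)

-- ===== LEMMAS AND PROOFS =====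

-- setting one cell of a map-over-range list, as a new cell function
theorem set_map_range {α : Type} (n : Nat) (f : Nat → α) (c : Nat) (v : α) :
    ((List.range n).map f).set c v
      = (List.range n).map (fun j => if j = c then v else f j) := by
  apply List.ext_getElem
  · simp
  · intro i h1 h2
    simp only [List.getElem_set, List.getElem_map, List.getElem_range]
    by_cases h : c = i
    · simp [h]
    · simp [h, show ¬ (i = c) from fun hh => h hh.symm]

-- A's scatter loop, characterised: each cell is '*' iff some point maps to it
theorem foldl_grid (mn_x mx_y : Int) (H W : Nat)
    (l : List (Int × Int))
    (hb : ∀ p ∈ l, 0 ≤ mx_y - p.2 ∧ mx_y - p.2 < (H : Int) ∧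
                   0 ≤ p.1 - mn_x ∧ p.1 - mn_x < (W : Int))
    (f : Nat → Nat → Char) :
    l.foldl (fun g p =>
        PySem.List.pySetD g (mx_y - p.2)
          (PySem.List.pySetD (PySem.List.pyGetD g (mx_y - p.2) []) (p.1 - mn_x) '*'))
      ((List.range H).map (fun i => (List.range W).map (f i)))
    = (List.range H).map (fun (i : Nat) => (List.range W).map (fun (j : Nat) =>
        if ∃ p ∈ l, mx_y - p.2 = (i : Int) ∧ p.1 - mn_x = (j : Int) then '*' else f i j)) := by
  induction l generalizing f with
  | nil =>
    rw [List.foldl_nil]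
    apply List.map_congr_left; intro i _
    apply List.map_congr_left; intro j _
    simp
  | cons p t ih =>
    obtain ⟨hr0, hrH, hc0, hcW⟩ := hb p (by simp)
    rw [List.foldl_cons]
    have hrow : PySem.List.pyGetD
        ((List.range H).map (fun i => (List.range W).map (f i))) (mx_y - p.2) []
        = (List.range W).map (f (mx_y - p.2).toNat) := by
      rw [PySem.List.pyGetD_of_nonneg _ _ hr0]
      rw [List.getD_eq_getElem?_getD, List.getElem?_map, List.getElem?_range (by omega)]
      rfl
    rw [hrow, PySem.List.pySetD_of_nonneg _ _ hc0, PySem.List.pySetD_of_nonneg _ _ hr0,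
        set_map_range, set_map_range]
    have hstep : (List.range H).map (fun j =>
          if j = (mx_y - p.2).toNat then
            (List.range W).map (fun j => if j = (p.1 - mn_x).toNat then '*' else f (mx_y - p.2).toNat j)
          else (List.range W).map (f j))
        = (List.range H).map (fun (i : Nat) => (List.range W).map (fun (j : Nat) =>
            if i = (mx_y - p.2).toNat ∧ j = (p.1 - mn_x).toNat then '*' else f i j)) := by
      apply List.map_congr_left
      intro i _
      by_cases hir : i = (mx_y - p.2).toNat
      · simp only [hir, if_pos]
        apply List.map_congr_left
        intro j _
        by_cases hjc : j = (p.1 - mn_x).toNat <;> simp [hjc]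
      · simp only [if_neg hir]
        apply List.map_congr_left
        intro j _
        simp [hir]
    rw [hstep, ih (fun q hq => hb q (by simp [hq]))]
    apply List.map_congr_left
    intro i _
    apply List.map_congr_left
    intro j _
    by_cases ht : ∃ q ∈ t, mx_y - q.2 = (i : Int) ∧ q.1 - mn_x = (j : Int)
    · have : ∃ q ∈ p :: t, mx_y - q.2 = (i : Int) ∧ q.1 - mn_x = (j : Int) := by
        obtain ⟨q, hq, h1, h2⟩ := ht; exact ⟨q, by simp [hq], h1, h2⟩
      rw [if_pos ht, if_pos this]
    · by_cases hp : mx_y - p.2 = (i : Int) ∧ p.1 - mn_x = (j : Int)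
      · have hcons : ∃ q ∈ p :: t, mx_y - q.2 = (i : Int) ∧ q.1 - mn_x = (j : Int) :=
          ⟨p, by simp, hp⟩
        have hi : i = (mx_y - p.2).toNat := by omega
        have hj : j = (p.1 - mn_x).toNat := by omega
        rw [if_neg ht, if_pos ⟨hi, hj⟩, if_pos hcons]
      · have hcons : ¬ ∃ q ∈ p :: t, mx_y - q.2 = (i : Int) ∧ q.1 - mn_x = (j : Int) := by
          rintro ⟨q, hq, h1, h2⟩
          rcases List.mem_cons.mp hq with rfl | hq'
          · exact hp ⟨h1, h2⟩
          · exact ht ⟨q, hq', h1, h2⟩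
        have hi : ¬ (i = (mx_y - p.2).toNat ∧ j = (p.1 - mn_x).toNat) := by
          rintro ⟨rfl, rfl⟩; exact hp ⟨by omega, by omega⟩
        simp only [ht, hcons]
        split_ifs <;> simp_all

-- B's grouping dict, characterised: x is in the row-set of y iff (x, y) is a point
theorem rows_mem (l : List (Int × Int)) (d : PySem.Dict Int (PySem.Set Int)) (x y : Int) :
    x ∈ PySem.Dict.getD (l.foldl (fun d p =>
        d.insert p.2 (PySem.Set.add (d.getD p.2 []) p.1)) d) y []
    ↔ (x, y) ∈ l ∨ x ∈ PySem.Dict.getD d y [] := by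
  induction l generalizing d with
  | nil => simp
  | cons p t ih =>
    rw [List.foldl_cons, ih, PySem.Dict.getD_insert]
    by_cases hy : y = p.2
    · subst hy
      simp only [if_true, PySem.Set.mem_add, List.mem_cons, Prod.ext_iff]
      tauto
    · simp only [if_neg hy, List.mem_cons, Prod.ext_iff]
      constructor
      · rintro (h | h) <;> tauto
      · rintro (⟨h1, h2⟩ | h) <;> tauto

-- ===== VERDICT (by name: the statement is the Claim_ definition above) =====
theorem display_coordinates_spec : Claim_equal_display_coordinates := by
  intro l _ hpre
  unfold Spec_display_coordinates display_coordinates display_coordinates_alt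
  rcases e1 : PySem.List.min? (l.map (fun p => p.1)) (fun v => v) with _ | mn_x
  · exact absurd (List.map_eq_nil_iff.mp ((PySem.List.min?_eq_none_iff _ _).mp e1)) hpre
  rcases e2 : PySem.List.max? (l.map (fun p => p.1)) (fun v => v) with _ | mx_x
  · exact absurd (List.map_eq_nil_iff.mp ((PySem.List.max?_eq_none_iff _ _).mp e2)) hpre
  rcases e3 : PySem.List.min? (l.map (fun p => p.2)) (fun v => v) with _ | mn_y
  · exact absurd (List.map_eq_nil_iff.mp ((PySem.List.min?_eq_none_iff _ _).mp e3)) hpre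
  rcases e4 : PySem.List.max? (l.map (fun p => p.2)) (fun v => v) with _ | mx_y
  · exact absurd (List.map_eq_nil_iff.mp ((PySem.List.max?_eq_none_iff _ _).mp e4)) hpre
  simp only [e1, e2, e3, e4]
  -- bounds from the four extrema
  have hxlo : ∀ p ∈ l, mn_x ≤ p.1 := fun p hp =>
    PySem.List.min?_isMin e1 p.1 (List.mem_map.mpr ⟨p, hp, rfl⟩)
  have hxhi : ∀ p ∈ l, p.1 ≤ mx_x := fun p hp =>
    PySem.List.max?_isMax e2 p.1 (List.mem_map.mpr ⟨p, hp, rfl⟩)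
  have hylo : ∀ p ∈ l, mn_y ≤ p.2 := fun p hp =>
    PySem.List.min?_isMin e3 p.2 (List.mem_map.mpr ⟨p, hp, rfl⟩)
  have hyhi : ∀ p ∈ l, p.2 ≤ mx_y := fun p hp =>
    PySem.List.max?_isMax e4 p.2 (List.mem_map.mpr ⟨p, hp, rfl⟩)
  obtain ⟨q, hq⟩ := List.exists_mem_of_ne_nil l hpre
  have hx : mn_x ≤ mx_x := le_trans (hxlo q hq) (hxhi q hq)
  have hy : mn_y ≤ mx_y := le_trans (hylo q hq) (hyhi q hq)
  set H : Nat := (mx_y - mn_y + 1).toNat with hH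
  set W : Nat := (mx_x - mn_x + 1).toNat with hW
  have hb : ∀ p ∈ l, 0 ≤ mx_y - p.2 ∧ mx_y - p.2 < (H : Int) ∧
                     0 ≤ p.1 - mn_x ∧ p.1 - mn_x < (W : Int) := by
    intro p hp
    have h1 := hxlo p hp; have h2 := hxhi p hp
    have h3 := hylo p hp; have h4 := hyhi p hp
    refine ⟨by omega, ?_, by omega, ?_⟩ <;> omega
  -- A side: initial grid as map over range, then the scatter characterisation
  have hinit : (PySem.List.pyRange 0 (mx_y - mn_y + 1) 1).map (fun _ =>
        (PySem.List.pyRange 0 (mx_x - mn_x + 1) 1).map (fun _ => '.'))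
      = (List.range H).map (fun i => (List.range W).map (fun _ => '.')) := by
    rw [PySem.List.pyRange_one, PySem.List.pyRange_one, List.map_map, List.map_map]
    simp only [Int.sub_zero, hH, hW]
    rfl
  rw [hinit, foldl_grid mn_x mx_y H W l hb (fun _ _ => '.')]
  -- B side: the outer countdown range as a map over List.range
  rw [PySem.List.pyRange_neg_one]
  have hHB : (mx_y - (mn_y - 1)).toNat = H := by omega
  have hWB : ((mx_x + 1) - mn_x).toNat = W := by omega
  rw [hHB, List.map_map, List.map_map]
  apply List.map_congr_left
  intro i hi
  have hiH : i < H := List.mem_range.mp hi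
  simp only [Function.comp]
  -- the per-row dict, characterised by rows_mem
  have hrows := fun (x : Int) => rows_mem l PySem.Dict.empty x (mx_y - (i : Int))
  have hmem : ∀ j : Nat, ((∃ p ∈ l, mx_y - p.2 = (i : Int) ∧ p.1 - mn_x = (j : Int))
      ↔ (mn_x + (j : Int), mx_y - (i : Int)) ∈ l) := by
    intro j
    constructor
    · rintro ⟨p, hp, h1, h2⟩
      have : p = (mn_x + (j : Int), mx_y - (i : Int)) := by
        cases p; simp_all; omega
      exact this ▸ hp
    · intro hp
      exact ⟨_, hp, by simp, by simp⟩
  rcases hget : PySem.Dict.get? (l.foldl (fun d p =>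
      d.insert p.2 (PySem.Set.add (d.getD p.2 []) p.1)) PySem.Dict.empty) (mx_y - (i : Int)) with _ | xs
  · -- no point on this row: it is all dots
    have hempty : ∀ x : Int, (x, mx_y - (i : Int)) ∉ l := by
      intro x hx
      have h0 := (hrows x).mpr (Or.inl hx)
      rw [PySem.Dict.getD, hget] at h0
      simp at h0
    congr 1
    have hcell : ∀ j ∈ List.range W,
        (if ∃ p ∈ l, mx_y - p.2 = (i : Int) ∧ p.1 - mn_x = (j : Int) then '*' else '.') = '.' := by
      intro j _
      rw [if_neg]
      intro h
      exact hempty _ ((hmem j).mp h)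
    rw [List.map_congr_left hcell]
    simp [List.map_const', List.length_range]
  · -- the row holds the set xs of its x-coordinates
    have hxs : PySem.Dict.getD (l.foldl (fun d p =>
        d.insert p.2 (PySem.Set.add (d.getD p.2 []) p.1)) PySem.Dict.empty) (mx_y - (i : Int)) [] = xs := by
      rw [PySem.Dict.getD, hget]
      rfl
    have hx : ∀ x : Int, x ∈ xs ↔ (x, mx_y - (i : Int)) ∈ l := by
      intro x
      rw [← hxs, hrows x]
      simp [PySem.Dict.getD, PySem.Dict.get?, PySem.Dict.empty]
    congr 1
    rw [PySem.List.pyRange_one, List.map_map, hWB]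
    apply List.map_congr_left
    intro j hj
    simp only [Function.comp]
    have hcont : PySem.Set.contains xs (mn_x + (j : Int))
        = decide ((mn_x + (j : Int)) ∈ xs) := by
      simp [PySem.Set.contains_eq_listContains, List.contains_eq_mem]
    rw [hcont]
    by_cases hc : (mn_x + (j : Int), mx_y - (i : Int)) ∈ l
    · rw [if_pos ((hmem j).mpr hc), if_pos (by simp [(hx _).mpr hc])]
    · rw [if_neg (fun h => hc ((hmem j).mp h)),
          if_neg (by simp; exact fun h => hc ((hx _).mp h))]
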